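-- pv_equiv track=rewrite | github.com/ljdyer/advent-of-code-2021 | solutions/day15/solution-part-two.py | make_big_matrix
-- ===== SOURCE A (Python) =====
-- def make_big_matrix(matrix):
--
--     def increase(num):
--         if num == 9:
--             return 1
--         else:
--             return num+1
--
--     def add_one(matrix):
--         new_matrix = [[increase(x) for x in l] for l in matrix]
--         return new_matrix
--
--     def append_right(matrix1, matrix2):
--         new_matrix = [matrix1[i] + matrix2[i] for i in range(len(matrix1))]
--         return new_matrix
--
--     def append_below(matrix1, matrix2):
--         return matrix1 + matrix2
--
--     append_matrix = matrix
--     for _ in range(4):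
--         append_matrix = add_one(append_matrix)
--         matrix = append_right(matrix, append_matrix)
--     append_matrix = matrix
--     for _ in range(4):
--         append_matrix = add_one(append_matrix)
--         matrix = append_below(matrix, append_matrix)
--
--     return matrix
-- ===== SOURCE B (Python) =====
-- def make_big_matrix(matrix):
--
--     def increase(num):
--         return 1 if num == 9 else num + 1
--
--     def inc_k(k, x):
--         for _ in range(k):
--             x = increase(x)
--         return x
--
--     return [
--         [inc_k(row_tile + col_tile, x) for col_tile in range(5) for x in row]
--         for row_tile in range(5)
--         for row in matrix
--     ]
-- ===== Notes on version B (the rewrite author's own statement) =====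
-- stated objective: simpler
-- what changed: Replaces the incremental grow-and-append pipeline (four append_right passes then four append_below passes, re-incrementing the ever-growing strip) with a single direct comprehension over tile indices that writes each 5x5 tile by applying increase (row_tile+col_tile) times to the source cell.
import Mathlib
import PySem

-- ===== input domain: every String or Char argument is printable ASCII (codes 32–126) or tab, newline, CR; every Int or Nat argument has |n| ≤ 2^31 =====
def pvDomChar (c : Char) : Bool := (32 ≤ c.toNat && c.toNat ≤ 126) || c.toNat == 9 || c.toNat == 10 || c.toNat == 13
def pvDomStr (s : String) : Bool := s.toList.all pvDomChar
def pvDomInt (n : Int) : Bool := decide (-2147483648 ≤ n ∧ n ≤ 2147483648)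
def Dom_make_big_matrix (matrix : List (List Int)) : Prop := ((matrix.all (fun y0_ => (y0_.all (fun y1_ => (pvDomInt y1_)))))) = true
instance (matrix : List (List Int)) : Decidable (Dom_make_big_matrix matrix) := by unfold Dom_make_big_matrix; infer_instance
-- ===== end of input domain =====

-- B replaces A's grow-and-append pipeline by one direct comprehension over tile
-- indices (simpler decomposition; return value proved equal on all inputs).

-- ===== PORT A =====
def pvIncA (num : Int) : Int := if num = 9 then 1 else num + 1

def pvAddOne (m : List (List Int)) : List (List Int) :=
  m.map (fun l => l.map pvIncA)

-- indices are always in range here (both arguments have equal length), so getD's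
-- default is never used
def pvAppendRight (m1 m2 : List (List Int)) : List (List Int) :=
  (List.range m1.length).map (fun i => m1.getD i [] ++ m2.getD i [])

def make_big_matrix (matrix : List (List Int)) : List (List Int) :=
  let p1 := (List.range 4).foldl
    (fun (p : List (List Int) × List (List Int)) _ =>
      let a := pvAddOne p.2
      (pvAppendRight p.1 a, a)) (matrix, matrix)
  let p2 := (List.range 4).foldl
    (fun (p : List (List Int) × List (List Int)) _ =>
      let a := pvAddOne p.2
      (p.1 ++ a, a)) (p1.1, p1.1)
  p2.1

-- ===== PORT B =====
def pvIncB (num : Int) : Int := if num = 9 then 1 else num + 1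

def pvIncK (k : Nat) (x : Int) : Int :=
  (List.range k).foldl (fun x _ => pvIncB x) x

def make_big_matrix_alt (matrix : List (List Int)) : List (List Int) :=
  (List.range 5).flatMap (fun rt =>
    matrix.map (fun row =>
      (List.range 5).flatMap (fun ct =>
        row.map (fun x => pvIncK (rt + ct) x))))

-- ===== PRECONDITION & SPEC =====
def Spec_make_big_matrix (matrix : List (List Int)) (out : List (List Int)) : Prop := out = make_big_matrix_alt matrix
instance (matrix : List (List Int)) (out : List (List Int)) : Decidable (Spec_make_big_matrix matrix out) := by unfold Spec_make_big_matrix; infer_instance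

-- ===== CLAIM (what is proved, stated in full; the proofs are below) =====
def Claim_equal_make_big_matrix : Prop := ∀ (matrix : List (List Int)), Dom_make_big_matrix matrix → Spec_make_big_matrix matrix (make_big_matrix matrix)

-- ===== LEMMAS AND PROOFS =====

theorem pvAppendRight_map (m : List (List Int)) (f g : List Int → List Int) :
    pvAppendRight (m.map f) (m.map g) = m.map (fun l => f l ++ g l) := by
  induction m with
  | nil => rfl
  | cons a m ih =>
    simp only [pvAppendRight, List.map_cons, List.length_cons, List.length_map,
      List.range_succ_eq_map, List.map_map]
    refine congrArg₂ List.cons rfl ?_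
    rw [← ih]
    simp [pvAppendRight, Function.comp]

theorem pvIncK_succ (k : Nat) (x : Int) : pvIncK (k + 1) x = pvIncA (pvIncK k x) := by
  simp [pvIncK, List.range_succ, pvIncB, pvIncA]

theorem pvIncK_zero : pvIncK 0 = fun x => x := rfl

theorem pvIncK_add (a b : Nat) (x : Int) :
    pvIncK (a + b) x = pvIncK a (pvIncK b x) := by
  induction a with
  | zero => simp [pvIncK_zero]
  | succ a ih =>
    have h : a + 1 + b = (a + b) + 1 := by omega
    rw [h, pvIncK_succ, pvIncK_succ, ih]

theorem loop1 (m : List (List Int)) (n : Nat) :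
    (List.range n).foldl
      (fun (p : List (List Int) × List (List Int)) _ =>
        let a := pvAddOne p.2
        (pvAppendRight p.1 a, a)) (m, m)
    = (m.map (fun l => (List.range (n + 1)).flatMap (fun ct => l.map (pvIncK ct))),
       m.map (fun l => l.map (pvIncK n))) := by
  induction n with
  | zero => simp [pvIncK_zero]
  | succ n ih =>
    rw [List.range_succ, List.foldl_append, ih]
    simp only [List.foldl_cons, List.foldl_nil]
    have ha : pvAddOne (m.map (fun l => l.map (pvIncK n)))
        = m.map (fun l => l.map (pvIncK (n + 1))) := by
      simp [pvAddOne, List.map_map, Function.comp, pvIncK_succ]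
    rw [ha, pvAppendRight_map]
    refine congrArg₂ Prod.mk ?_ rfl
    refine List.map_congr_left (fun l _ => ?_)
    rw [List.range_succ (n := n + 1), List.flatMap_append]
    simp

theorem loop2 (H : List (List Int)) (n : Nat) :
    (List.range n).foldl
      (fun (p : List (List Int) × List (List Int)) _ =>
        let a := pvAddOne p.2
        (p.1 ++ a, a)) (H, H)
    = ((List.range (n + 1)).flatMap (fun rt => H.map (fun l => l.map (pvIncK rt))),
       H.map (fun l => l.map (pvIncK n))) := by
  induction n with
  | zero => simp [pvIncK_zero]
  | succ n ih =>
    rw [List.range_succ, List.foldl_append, ih]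
    simp only [List.foldl_cons, List.foldl_nil]
    have ha : pvAddOne (H.map (fun l => l.map (pvIncK n)))
        = H.map (fun l => l.map (pvIncK (n + 1))) := by
      simp [pvAddOne, List.map_map, Function.comp, pvIncK_succ]
    rw [ha]
    refine congrArg₂ Prod.mk ?_ rfl
    rw [List.range_succ (n := n + 1), List.flatMap_append]
    simp

theorem make_big_matrix_eq (matrix : List (List Int)) :
    make_big_matrix matrix = make_big_matrix_alt matrix := by
  show ((List.range 4).foldl _ (_, _)).1 = _
  rw [loop1]
  rw [loop2]
  simp only [make_big_matrix_alt, List.map_map]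
  refine List.flatMap_congr (fun rt _ => ?_)
  refine List.map_congr_left (fun l _ => ?_)
  simp [Function.comp_def, List.map_flatMap, List.map_map, pvIncK_add]

-- ===== VERDICT (by name: the statement is the Claim_ definition above) =====
theorem make_big_matrix_spec : Claim_equal_make_big_matrix := by
  intro m _
  unfold Spec_make_big_matrix
  exact make_big_matrix_eq m
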